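-- pv_equiv track=rewrite | github.com/EcodiaTate/organism-backend | systems/telos/coherence.py | _domains_related
-- ===== SOURCE A (Python) =====
-- def _domains_related(a: str, b: str) -> bool:
--     """Check if two domain names are structurally related."""
--     # Share a common prefix of at least 3 characters
--     prefix_len = 0
--     for ca, cb in zip(a.lower(), b.lower(), strict=False):
--         if ca == cb:
--             prefix_len += 1
--         else:
--             break
--     return prefix_len >= 3
-- ===== SOURCE B (Python) =====
-- def _domains_related(a: str, b: str) -> bool:
--     """Check if two domain names are structurally related."""
--     return len(a) >= 3 and len(b) >= 3 and a.lower()[:3] == b.lower()[:3]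
-- ===== Notes on version B (the rewrite author's own statement) =====
-- stated objective: simpler
-- what changed: Replaces the interpreted character-by-character common-prefix counting loop with a single closed-form boolean expression: both lengths >= 3 and the lowercased 3-character prefixes (fixed-width slices) are equal.
import Mathlib
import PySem

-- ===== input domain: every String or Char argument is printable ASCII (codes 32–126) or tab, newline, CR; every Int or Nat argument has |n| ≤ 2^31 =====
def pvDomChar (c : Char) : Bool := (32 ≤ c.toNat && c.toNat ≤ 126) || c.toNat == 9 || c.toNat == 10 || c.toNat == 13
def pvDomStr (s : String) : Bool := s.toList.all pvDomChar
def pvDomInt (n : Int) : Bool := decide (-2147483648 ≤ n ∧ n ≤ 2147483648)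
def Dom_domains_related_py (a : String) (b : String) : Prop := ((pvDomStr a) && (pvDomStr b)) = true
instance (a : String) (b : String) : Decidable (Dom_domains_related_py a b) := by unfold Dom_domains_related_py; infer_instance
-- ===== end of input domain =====

-- B replaces A's character-counting loop with one closed-form boolean: both lengths >= 3 and the lowercased 3-char prefixes equal (objective: simpler).


-- ===== PORT A =====
-- the for-loop with break: counts leading positions where the lowered chars agree
def pvPrefixLen : List Char → List Char → Nat
  | ca :: as, cb :: bs => if ca == cb then pvPrefixLen as bs + 1 else 0
  | _, _ => 0

def domains_related_py (a : String) (b : String) : Bool :=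
  decide (3 ≤ pvPrefixLen (PySem.Str.lower a).toList (PySem.Str.lower b).toList)

-- ===== PORT B =====
def domains_related_py_alt (a : String) (b : String) : Bool :=
  decide (3 ≤ a.toList.length) && decide (3 ≤ b.toList.length) &&
    ((PySem.Str.lower a).toList.take 3 == (PySem.Str.lower b).toList.take 3)

-- ===== PRECONDITION & SPEC =====
def Spec_domains_related_py (a : String) (b : String) (out : Bool) : Prop := out = domains_related_py_alt a b
instance (a : String) (b : String) (out : Bool) : Decidable (Spec_domains_related_py a b out) := by unfold Spec_domains_related_py; infer_instance

-- ===== CLAIM (what is proved, stated in full; the proofs are below) =====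
def Claim_equal_domains_related_py : Prop := ∀ (a : String) (b : String), Dom_domains_related_py a b → Spec_domains_related_py a b (domains_related_py a b)

-- ===== LEMMAS AND PROOFS =====
lemma pvPrefixLen_le_iff (n : Nat) (x y : List Char) :
    n ≤ pvPrefixLen x y ↔ n ≤ x.length ∧ n ≤ y.length ∧ x.take n = y.take n := by
  induction x generalizing y n with
  | nil => cases n <;> simp [pvPrefixLen]
  | cons cx xs ih =>
    cases y with
    | nil => cases n <;> simp [pvPrefixLen]
    | cons cy ys =>
      cases n with
      | zero => simp
      | succ n =>
        by_cases h : cx = cy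
        · simp [pvPrefixLen, h, ih]
        · simp [pvPrefixLen, h]

lemma pvLower_length (s : String) : (PySem.Str.lower s).toList.length = s.toList.length := by
  simp [PySem.Str.toList_lower, PySem.Chars.lower]

-- ===== VERDICT (by name: the statement is the Claim_ definition above) =====
theorem domains_related_py_spec : Claim_equal_domains_related_py := by
  intro a b _
  unfold Spec_domains_related_py domains_related_py domains_related_py_alt
  have hbeq : ∀ (x y : List Char), (x == y) = decide (x = y) := by
    intro x y; by_cases h : x = y <;> simp [h]
  simp only [pvPrefixLen_le_iff, pvLower_length, hbeq]
  simp [Bool.and_assoc]
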